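-- pv_equiv track=rewrite | github.com/Jatin-kaushik/DSAlvl2-python | hashmapandheaplvl2/pairsuminsortedmat.py | solve
-- ===== SOURCE A (Python) =====
-- def solve(arr1, arr2, tar):
--     dict1 = {}
--     for i in arr1:
--         for j in i:
--             if j in dict1:
--                 dict1[j] +=1
--             else:
--                 dict1[j] = 1
--     c = 0
--     for i in arr2:
--         for j in i:
--             fele = tar-j
--             if fele in dict1:
--                 c += dict1[fele]
--     return c
-- ===== SOURCE B (Python) =====
-- def solve(arr1, arr2, tar):
--     # Sort both flattened matrices and count matching pairs with a two-pointer
--     # scan (ascending xs vs descending ys), adding run-length products on a hit.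
--     xs = sorted(x for row in arr1 for x in row)
--     ys = sorted((y for row in arr2 for y in row), reverse=True)
--     c = 0
--     i = j = 0
--     while i < len(xs) and j < len(ys):
--         s = xs[i] + ys[j]
--         if s < tar:
--             i += 1
--         elif s > tar:
--             j += 1
--         else:
--             i2 = i
--             while i2 < len(xs) and xs[i2] == xs[i]:
--                 i2 += 1
--             j2 = j
--             while j2 < len(ys) and ys[j2] == ys[j]:
--                 j2 += 1
--             c += (i2 - i) * (j2 - j)
--             i, j = i2, j2
--     return c
-- ===== Notes on version B (the rewrite author's own statement) =====
-- stated objective: alternative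
-- what changed: B replaces A's hash-counter with sorting both flattened matrices and a two-pointer scan (ascending vs descending) that adds run-length products at each matching sum.
import Mathlib
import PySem

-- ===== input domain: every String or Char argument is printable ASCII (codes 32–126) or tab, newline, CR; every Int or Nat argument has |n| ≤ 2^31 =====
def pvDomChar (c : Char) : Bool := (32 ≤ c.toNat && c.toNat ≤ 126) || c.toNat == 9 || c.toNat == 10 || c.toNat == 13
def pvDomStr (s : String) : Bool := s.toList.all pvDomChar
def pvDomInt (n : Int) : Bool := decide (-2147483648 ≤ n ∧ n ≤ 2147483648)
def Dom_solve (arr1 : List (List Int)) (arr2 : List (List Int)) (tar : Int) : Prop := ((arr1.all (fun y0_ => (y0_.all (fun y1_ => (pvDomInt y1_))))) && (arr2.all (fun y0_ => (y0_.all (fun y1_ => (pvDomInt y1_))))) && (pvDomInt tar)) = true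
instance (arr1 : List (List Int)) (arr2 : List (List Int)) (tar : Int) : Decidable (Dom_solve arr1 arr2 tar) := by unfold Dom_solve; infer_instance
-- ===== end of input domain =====

-- B sorts both flattened matrices and counts matching pairs with a two-pointer scan
-- (ascending vs descending), adding a run-length product at each matching sum:
-- a different algorithm from A's hash counter, same result.

-- ===== PORT A =====
def solve (arr1 : List (List Int)) (arr2 : List (List Int)) (tar : Int) : Int :=
  let dict1 := arr1.foldl (fun d i => i.foldl (fun d j =>
      if d.contains j then d.modify j 0 (· + 1) else d.insert j 1) d) PySem.Dict.empty
  arr2.foldl (fun c i => i.foldl (fun c j =>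
      let fele := tar - j
      if dict1.contains fele then c + dict1.getD fele 0 else c) c) 0

-- ===== PORT B =====
-- inner "while xs[i2] == xs[i]" run scan: length of the leading run of v, and the rest
def dropRun (v : Int) : List Int → Nat × List Int
  | [] => (0, [])
  | x :: xs => if x = v then ((dropRun v xs).1 + 1, (dropRun v xs).2) else (0, x :: xs)

theorem dropRun_length_le (v : Int) : ∀ l : List Int, (dropRun v l).2.length ≤ l.length := by
  intro l
  induction l with
  | nil => simp [dropRun]
  | cons x xs ih =>
    by_cases h : x = v <;> simp [dropRun, h] <;> omega

theorem dropRun_cons_self (v : Int) (l : List Int) :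
    dropRun v (v :: l) = ((dropRun v l).1 + 1, (dropRun v l).2) := by
  simp [dropRun]

-- the two-pointer while loop: first list ascending (suffix from i), second descending (suffix from j)
def tp (tar : Int) : List Int → List Int → Int → Int
  | [], _, c => c
  | _ :: _, [], c => c
  | x :: xs, y :: ys, c =>
    if x + y < tar then tp tar xs (y :: ys) c
    else if tar < x + y then tp tar (x :: xs) ys c
    else
      tp tar (dropRun x (x :: xs)).2 (dropRun y (y :: ys)).2
        (c + ((dropRun x (x :: xs)).1 : Int) * ((dropRun y (y :: ys)).1 : Int))
termination_by xs ys c => xs.length + ys.length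
decreasing_by
  all_goals first
    | (simp only [List.length_cons]; omega)
    | (have h1 := dropRun_length_le x xs
       have h2 := dropRun_length_le y ys
       rw [dropRun_cons_self, dropRun_cons_self]
       simp only [List.length_cons]
       omega)

def solve_alt (arr1 : List (List Int)) (arr2 : List (List Int)) (tar : Int) : Int :=
  let xs := PySem.List.sorted arr1.flatten (fun x => x) false
  let ys := PySem.List.sorted arr2.flatten (fun y => y) true
  tp tar xs ys 0

-- ===== PRECONDITION & SPEC =====
def Spec_solve (arr1 : List (List Int)) (arr2 : List (List Int)) (tar : Int) (out : Int) : Prop := out = solve_alt arr1 arr2 tar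
instance (arr1 : List (List Int)) (arr2 : List (List Int)) (tar : Int) (out : Int) : Decidable (Spec_solve arr1 arr2 tar out) := by unfold Spec_solve; infer_instance

-- ===== CLAIM =====
def Claim_equal_solve : Prop := ∀ (arr1 : List (List Int)) (arr2 : List (List Int)) (tar : Int), Dom_solve arr1 arr2 tar → Spec_solve arr1 arr2 tar (solve arr1 arr2 tar)

-- ===== LEMMAS AND PROOFS =====

-- Σ_{x ∈ xs} (number of y ∈ ys with x + y = tar)
def pairSum (tar : Int) (xs ys : List Int) : Int :=
  (xs.map (fun x => (ys.count (tar - x) : Int))).sum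

-- A's "if j in d: d[j]+=1 else: d[j]=1" is exactly d.modify j 0 (·+1).
theorem stepA_eq_modify (d : PySem.Dict Int Int) (j : Int) :
    (if d.contains j then d.modify j 0 (· + 1) else d.insert j 1) = d.modify j 0 (· + 1) := by
  by_cases h : d.contains j
  · simp [h]
  · have h' : d.contains j = false := by simpa using h
    have h0 : d.getD j 0 = 0 := by
      simp [PySem.Dict.getD, (PySem.Dict.get?_eq_none_iff_contains d j).2 h']
    simp [h', PySem.Dict.insert, PySem.Dict.modify, h0]

-- A's counting loop builds Counter(flatten arr1).
theorem dictA_eq_counter (arr : List (List Int)) :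
    arr.foldl (fun d i => i.foldl (fun d j =>
        if d.contains j then d.modify j 0 (· + 1) else d.insert j 1) d) PySem.Dict.empty
      = PySem.Dict.counter arr.flatten := by
  have hf : (fun (d : PySem.Dict Int Int) (j : Int) =>
      if d.contains j then d.modify j 0 (· + 1) else d.insert j 1)
      = fun d j => d.modify j 0 (· + 1) := by
    funext d j; exact stepA_eq_modify d j
  rw [hf, ← List.foldl_flatten, ← PySem.Dict.counter_eq_foldl]

theorem solve_eq_pairSum (arr1 arr2 : List (List Int)) (tar : Int) :
    solve arr1 arr2 tar = pairSum tar arr2.flatten arr1.flatten := by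
  unfold solve
  rw [dictA_eq_counter, ← List.foldl_flatten]
  have hf : (fun (c : Int) (j : Int) =>
      let fele := tar - j
      if (PySem.Dict.counter arr1.flatten).contains fele then
        c + (PySem.Dict.counter arr1.flatten).getD fele 0 else c)
      = fun c j => c + (arr1.flatten.count (tar - j) : Int) := by
    funext c j
    by_cases h : (tar - j) ∈ arr1.flatten
    · simp [PySem.Dict.contains_counter, PySem.Dict.getD_counter, h]
    · have : arr1.flatten.count (tar - j) = 0 := List.count_eq_zero.2 h
      simp [PySem.Dict.contains_counter, h, this]
  rw [hf, PySem.List.foldl_add]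
  simp [pairSum]

-- basic pairSum facts
theorem pairSum_nil_right (tar : Int) (xs : List Int) : pairSum tar xs [] = 0 := by
  simp [pairSum]

theorem pairSum_append_right (tar : Int) (xs l1 l2 : List Int) :
    pairSum tar xs (l1 ++ l2) = pairSum tar xs l1 + pairSum tar xs l2 := by
  unfold pairSum
  have : (fun x => ((l1 ++ l2).count (tar - x) : Int))
      = fun x => (l1.count (tar - x) : Int) + (l2.count (tar - x) : Int) := by
    funext x; simp [List.count_append]
  rw [this, PySem.List.sum_map_add_int]

theorem pairSum_replicate_left (tar : Int) (n : Nat) (v : Int) (r ys : List Int) :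
    pairSum tar (List.replicate n v ++ r) ys
      = n * (ys.count (tar - v) : Int) + pairSum tar r ys := by
  unfold pairSum
  rw [List.map_append, List.sum_append, List.map_replicate, List.sum_replicate]
  simp [nsmul_eq_mul]

theorem pairSum_replicate_right (tar : Int) (m : Nat) (w : Int) :
    ∀ xs : List Int, pairSum tar xs (List.replicate m w) = m * (xs.count (tar - w) : Int) := by
  intro xs
  induction xs with
  | nil => simp [pairSum]
  | cons x xs ih =>
    unfold pairSum at *
    rw [List.map_cons, List.sum_cons, ih]
    by_cases h : x = tar - w
    · have h2 : tar - x = w := by omega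
      simp [List.count_replicate, List.count_cons, h, h2]
      push_cast
      ring
    · have h2' : w ≠ tar - x := by omega
      have h' : ¬ (x = tar - w) := by omega
      simp [List.count_replicate, List.count_cons, h', h2']

-- first head contributes nothing when x + (max of ys) < tar
theorem pairSum_cons_left_zero (tar x : Int) (xs ys : List Int)
    (h : ys.count (tar - x) = 0) :
    pairSum tar (x :: xs) ys = pairSum tar xs ys := by
  simp [pairSum, h]

theorem perm_pairSum (tar : Int) (xs xs' ys ys' : List Int)
    (hx : xs.Perm xs') (hy : ys.Perm ys') :
    pairSum tar xs ys = pairSum tar xs' ys' := by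
  unfold pairSum
  have hmap : (xs.map (fun x => (ys.count (tar - x) : Int))).Perm
      (xs'.map (fun x => (ys.count (tar - x) : Int))) := hx.map _
  rw [hmap.sum_eq]
  have : (fun x => (ys.count (tar - x) : Int)) = fun x => (ys'.count (tar - x) : Int) := by
    funext x; rw [hy.count_eq]
  rw [this]

theorem sum_indicator_eq_count (t : Int) : ∀ ys : List Int,
    (ys.map (fun y => if y = t then (1:Int) else 0)).sum = (ys.count t : Int) := by
  intro ys
  induction ys with
  | nil => simp
  | cons a ys ih =>
    by_cases h : a = t
    · simp [List.count_cons, h, ih]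
      omega
    · simp [List.count_cons, h, ih]

theorem pairSum_comm (tar : Int) : ∀ (xs ys : List Int), pairSum tar xs ys = pairSum tar ys xs := by
  intro xs
  induction xs with
  | nil => intro ys; simp [pairSum]
  | cons x xs ih =>
    intro ys
    have h1 : pairSum tar (x :: xs) ys
        = (ys.count (tar - x) : Int) + pairSum tar xs ys := by
      simp [pairSum]
    have h2 : pairSum tar ys (x :: xs)
        = (ys.count (tar - x) : Int) + pairSum tar ys xs := by
      unfold pairSum
      have : (fun y => (((x :: xs).count (tar - y) : Nat) : Int))
          = fun y => ((if y = tar - x then (1:Int) else 0) + (xs.count (tar - y) : Int)) := by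
        funext y
        by_cases h : tar - y = x
        · have : y = tar - x := by omega
          simp [List.count_cons, h, this]
          omega
        · have : ¬ (y = tar - x) := by omega
          simp [List.count_cons, h, this]
          omega
      rw [this, PySem.List.sum_map_add_int]
      rw [sum_indicator_eq_count]
    rw [h1, h2, ih]

-- elements after a dropRun on a sorted-ascending list are strictly greater
theorem dropRun_rest_gt (v : Int) :
    ∀ l : List Int, l.Pairwise (· ≤ ·) → (∀ z ∈ l, v ≤ z) →
      ∀ z ∈ (dropRun v l).2, v < z := by
  intro l
  induction l with
  | nil => intro _ _ z hz; simp [dropRun] at hz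
  | cons x xs ih =>
    intro hp hge z hz
    by_cases h : x = v
    · rw [dropRun, if_pos h] at hz
      refine ih hp.tail (fun w hw => ?_) z hz
      exact le_trans (hge x List.mem_cons_self) (h ▸ (List.pairwise_cons.1 hp).1 w hw)
    · rw [dropRun, if_neg h] at hz
      rcases List.mem_cons.1 hz with rfl | hz'
      · exact lt_of_le_of_ne (hge z List.mem_cons_self) (fun e => h e.symm)
      · have hx : v < x := lt_of_le_of_ne (hge x List.mem_cons_self) (fun e => h e.symm)
        exact lt_of_lt_of_le hx ((List.pairwise_cons.1 hp).1 z hz')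

-- elements after a dropRun on a sorted-descending list are strictly smaller
theorem dropRun_rest_lt (v : Int) :
    ∀ l : List Int, l.Pairwise (fun a b => b ≤ a) → (∀ z ∈ l, z ≤ v) →
      ∀ z ∈ (dropRun v l).2, z < v := by
  intro l
  induction l with
  | nil => intro _ _ z hz; simp [dropRun] at hz
  | cons x xs ih =>
    intro hp hge z hz
    by_cases h : x = v
    · rw [dropRun, if_pos h] at hz
      refine ih hp.tail (fun w hw => ?_) z hz
      exact le_trans (h ▸ (List.pairwise_cons.1 hp).1 w hw) (hge x List.mem_cons_self)
    · rw [dropRun, if_neg h] at hz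
      rcases List.mem_cons.1 hz with rfl | hz'
      · exact lt_of_le_of_ne (hge z List.mem_cons_self) h
      · have hx : x < v := lt_of_le_of_ne (hge x List.mem_cons_self) h
        exact lt_of_le_of_lt ((List.pairwise_cons.1 hp).1 z hz') hx

theorem dropRun_decomp (v : Int) :
    ∀ l : List Int, l = List.replicate (dropRun v l).1 v ++ (dropRun v l).2 := by
  intro l
  induction l with
  | nil => simp [dropRun]
  | cons x xs ih =>
    by_cases h : x = v
    · rw [dropRun, if_pos h, List.replicate_succ]
      simpa [h] using congrArg (List.cons v) ih
    · rw [dropRun, if_neg h]; simp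

-- sorted suffixes stay sorted
theorem pairwise_suffix {R : Int → Int → Prop} (l1 l2 : List Int)
    (h : (l1 ++ l2).Pairwise R) : l2.Pairwise R :=
  (List.pairwise_append.1 h).2.1

-- main loop invariant
theorem tp_eq (tar : Int) :
    ∀ (N : Nat) (xs ys : List Int) (c : Int), xs.length + ys.length ≤ N →
      xs.Pairwise (· ≤ ·) → ys.Pairwise (fun a b => b ≤ a) →
      tp tar xs ys c = c + pairSum tar xs ys := by
  intro N
  induction N with
  | zero =>
    intro xs ys c hlen _ _
    have hx : xs = [] := List.eq_nil_of_length_eq_zero (by omega)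
    have hy : ys = [] := List.eq_nil_of_length_eq_zero (by omega)
    subst hx; subst hy
    simp [tp, pairSum]
  | succ N ih =>
    intro xs ys c hlen hpx hpy
    match xs, ys with
    | [], ys => simp [tp, pairSum]
    | x :: xs, [] => simp [tp, pairSum_nil_right]
    | x :: xs, y :: ys =>
      by_cases hlt : x + y < tar
      · rw [tp, if_pos hlt]
        rw [ih xs (y :: ys) c (by simp at hlen ⊢; omega) hpx.tail hpy]
        congr 1
        apply (pairSum_cons_left_zero tar x xs (y :: ys) ?_).symm
        apply List.count_eq_zero.2
        intro hmem
        have hy' : ∀ w ∈ y :: ys, w ≤ y := by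
          intro w hw
          rcases List.mem_cons.1 hw with rfl | hw'
          · exact le_refl _
          · exact (List.pairwise_cons.1 hpy).1 w hw'
        have := hy' (tar - x) hmem
        omega
      · by_cases hgt : tar < x + y
        · rw [tp, if_neg hlt, if_pos hgt]
          rw [ih (x :: xs) ys c (by simp at hlen ⊢; omega) hpx hpy.tail]
          congr 1
          have hsplit : (y :: ys) = [y] ++ ys := rfl
          rw [hsplit, pairSum_append_right]
          have hzero : pairSum tar (x :: xs) [y] = 0 := by
            unfold pairSum
            apply List.sum_eq_zero
            intro z hz
            rcases List.mem_map.1 hz with ⟨w, hw, rfl⟩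
            have hxw : x ≤ w := by
              rcases List.mem_cons.1 hw with rfl | hw'
              · exact le_refl _
              · exact (List.pairwise_cons.1 hpx).1 w hw'
            have : [y].count (tar - w) = 0 := by
              apply List.count_eq_zero.2
              simp
              omega
            simp [this]
          rw [hzero]; ring
        · have heq : x + y = tar := by omega
          rw [tp, if_neg hlt, if_neg hgt]
          have hxge : ∀ z ∈ x :: xs, x ≤ z := by
            intro z hz
            rcases List.mem_cons.1 hz with rfl | hz'
            · exact le_refl _
            · exact (List.pairwise_cons.1 hpx).1 z hz'
          have hyle : ∀ z ∈ y :: ys, z ≤ y := by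
            intro z hz
            rcases List.mem_cons.1 hz with rfl | hz'
            · exact le_refl _
            · exact (List.pairwise_cons.1 hpy).1 z hz'
          have hxdec := dropRun_decomp x (x :: xs)
          have hydec := dropRun_decomp y (y :: ys)
          have hxrest := dropRun_rest_gt x (x :: xs) hpx hxge
          have hyrest := dropRun_rest_lt y (y :: ys) hpy hyle
          set n := (dropRun x (x :: xs)).1 with hn
          set r := (dropRun x (x :: xs)).2 with hr
          set m := (dropRun y (y :: ys)).1 with hm
          set r' := (dropRun y (y :: ys)).2 with hr'
          have hpr : r.Pairwise (· ≤ ·) := by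
            rw [hxdec] at hpx; exact pairwise_suffix _ _ hpx
          have hpr' : r'.Pairwise (fun a b => b ≤ a) := by
            rw [hydec] at hpy; exact pairwise_suffix _ _ hpy
          have hlr : r.length ≤ xs.length := by
            have := dropRun_length_le x xs
            rw [hr, dropRun_cons_self]
            exact this
          have hlr' : r'.length ≤ ys.length := by
            have := dropRun_length_le y ys
            rw [hr', dropRun_cons_self]
            exact this
          rw [ih r r' _ (by simp at hlen; omega) hpr hpr']
          -- now compute pairSum (x::xs) (y::ys)
          have hps : pairSum tar (x :: xs) (y :: ys) = (n : Int) * m + pairSum tar r r' := by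
            conv_lhs => rw [hxdec, hydec]
            rw [pairSum_replicate_left, pairSum_append_right, pairSum_replicate_right]
            have hcy : (List.replicate m y ++ r').count (tar - x) = m := by
              have heqy : tar - x = y := by omega
              rw [heqy, List.count_append, List.count_replicate]
              have : r'.count y = 0 := by
                apply List.count_eq_zero.2
                intro hmem
                exact absurd rfl (ne_of_lt (hyrest y hmem))
              simp [this]
            have hcx : r.count (tar - y) = 0 := by
              have heqx : tar - y = x := by omega
              rw [heqx]
              apply List.count_eq_zero.2
              intro hmem
              exact absurd rfl (ne_of_gt (hxrest x hmem))
            rw [hcy, hcx]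
            push_cast
            ring
          rw [hps]
          ring

theorem solve_alt_eq_pairSum (arr1 arr2 : List (List Int)) (tar : Int) :
    solve_alt arr1 arr2 tar = pairSum tar arr1.flatten arr2.flatten := by
  unfold solve_alt
  have hpx : (PySem.List.sorted arr1.flatten (fun x => x) false).Pairwise (· ≤ ·) := by
    have := PySem.List.sorted_pairwise (xs := arr1.flatten) (key := fun x => x)
    simpa using this
  have hpy : (PySem.List.sorted arr2.flatten (fun y => y) true).Pairwise (fun a b => b ≤ a) := by
    have := PySem.List.sorted_pairwise_rev (xs := arr2.flatten) (key := fun y => y)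
    simpa using this
  rw [tp_eq tar ((PySem.List.sorted arr1.flatten (fun x => x) false).length
      + (PySem.List.sorted arr2.flatten (fun y => y) true).length) _ _ 0 (le_refl _) hpx hpy]
  rw [perm_pairSum tar _ arr1.flatten _ arr2.flatten
    (PySem.List.sorted_perm _ _ _) (PySem.List.sorted_perm _ _ _)]
  simp

-- ===== VERDICT =====
theorem solve_spec : Claim_equal_solve := by
  intro arr1 arr2 tar _
  unfold Spec_solve
  rw [solve_eq_pairSum, solve_alt_eq_pairSum, pairSum_comm]
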